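-- pv_equiv track=rewrite | github.com/alexc17/locallearner | locallearner/ngram_counts.py | count_trigrams
-- ===== SOURCE A (Python) =====
-- from collections import Counter
--
-- BOUNDARY = '<s>'
--
-- def count_trigrams(sentences):
--     """Count all trigrams in a corpus, including sentence boundaries.
--
--     Each sentence is padded with <s> on both sides:
--       <s> w1 w2 ... wn <s>
--     producing trigrams: (<s>,w1,w2), (w1,w2,w3), ..., (wn-1,wn,<s>).
--     For length-1 sentences: (<s>,w1,<s>).
--     For length-2 sentences: (<s>,w1,w2), (w1,w2,<s>).
--
--     Args:
--         sentences: iterable of tuples/lists of word strings.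
--
--     Returns:
--         Counter mapping (word1, word2, word3) -> count.
--     """
--     counts = Counter()
--     for s in sentences:
--         n = len(s)
--         if n == 0:
--             continue
--         if n == 1:
--             counts[(BOUNDARY, s[0], BOUNDARY)] += 1
--             continue
--         # First trigram
--         counts[(BOUNDARY, s[0], s[1])] += 1
--         # Internal trigrams
--         for i in range(1, n - 1):
--             counts[(s[i - 1], s[i], s[i + 1])] += 1
--         # Last trigram
--         counts[(s[n - 2], s[n - 1], BOUNDARY)] += 1
--     return counts
-- ===== SOURCE B (Python) =====
-- from collections import Counter
--
-- BOUNDARY = '<s>'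
--
-- def _trigrams(seq):
--     """All consecutive trigrams of seq, by structural recursion on the list."""
--     if len(seq) < 3:
--         return []
--     return [(seq[0], seq[1], seq[2])] + _trigrams(seq[1:])
--
-- def count_trigrams(sentences):
--     """Two staged passes: first materialise the flat list of all padded trigrams
--     (recursive extraction per padded sentence), then count it with one
--     Counter(...) constructor call."""
--     all_tris = []
--     for s in sentences:
--         all_tris = all_tris + _trigrams([BOUNDARY, *s, BOUNDARY])
--     return Counter(all_tris)
-- ===== Notes on version B (the rewrite author's own statement) =====
-- stated objective: alternative
-- what changed: B replaces A's single-pass incrementing loop with explicit n==0/n==1/first/internal/last branches by two staged passes: a recursive trigram extractor over each BOUNDARY-padded sentence builds one flat list of all trigrams, which is then counted by a single Counter(...) constructor call.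
import Mathlib
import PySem

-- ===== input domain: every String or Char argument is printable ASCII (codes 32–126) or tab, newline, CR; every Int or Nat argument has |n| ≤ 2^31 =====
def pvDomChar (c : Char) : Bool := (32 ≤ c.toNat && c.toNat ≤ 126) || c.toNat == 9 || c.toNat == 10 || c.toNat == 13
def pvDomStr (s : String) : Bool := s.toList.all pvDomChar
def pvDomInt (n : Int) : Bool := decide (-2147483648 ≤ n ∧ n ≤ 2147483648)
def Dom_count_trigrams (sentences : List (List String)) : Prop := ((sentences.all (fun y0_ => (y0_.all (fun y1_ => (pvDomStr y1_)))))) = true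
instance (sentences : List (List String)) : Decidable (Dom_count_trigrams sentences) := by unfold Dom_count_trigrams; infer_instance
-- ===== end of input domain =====

-- B stages the computation: a recursive trigram extractor over each padded sentence
-- builds one flat list, counted by a single Counter(...) constructor (objective: alternative).

-- ===== PORT A =====
def pvBOUNDARY : String := "<s>"

-- Counter increment: counts[k] += 1 (Counter's missing key reads as 0)
def pvIncr (d : PySem.Dict (String × String × String) Int)
    (k : String × String × String) : PySem.Dict (String × String × String) Int :=
  d.modify k 0 (· + 1)

-- body of A's 'for s in sentences' loop; every index A uses is in range,
-- so the pyGetD default "" never fires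
def pvStepA (d : PySem.Dict (String × String × String) Int) (s : List String) :
    PySem.Dict (String × String × String) Int :=
  let n : Int := PySem.List.len s
  if n = 0 then d
  else if n = 1 then pvIncr d (pvBOUNDARY, PySem.List.pyGetD s 0 "", pvBOUNDARY)
  else
    let d1 := pvIncr d (pvBOUNDARY, PySem.List.pyGetD s 0 "", PySem.List.pyGetD s 1 "")
    let d2 := (PySem.List.pyRange 1 (n - 1) 1).foldl
      (fun d i => pvIncr d (PySem.List.pyGetD s (i - 1) "", PySem.List.pyGetD s i "",
                            PySem.List.pyGetD s (i + 1) "")) d1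
    pvIncr d2 (PySem.List.pyGetD s (n - 2) "", PySem.List.pyGetD s (n - 1) "", pvBOUNDARY)

def count_trigrams (sentences : List (List String)) : List (String × String × String × Int) :=
  ((sentences.foldl pvStepA PySem.Dict.empty).items).map (fun p => (p.1.1, p.1.2.1, p.1.2.2, p.2))

-- ===== PORT B =====
-- _trigrams: if len(seq) < 3: return []; else [(seq[0],seq[1],seq[2])] + _trigrams(seq[1:])
def pvTrigs : List String → List (String × String × String)
  | a :: b :: c :: t => (a, b, c) :: pvTrigs (b :: c :: t)
  | _ => []

-- the staged pipeline: flat list of all padded trigrams, then one Counter(...) call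
def count_trigrams_alt (sentences : List (List String)) : List (String × String × String × Int) :=
  let all_tris := sentences.foldl
    (fun acc s => acc ++ pvTrigs (pvBOUNDARY :: s ++ [pvBOUNDARY])) []
  -- Counter(iterable): count in first-occurrence order
  ((all_tris.foldl pvIncr PySem.Dict.empty).items).map (fun p => (p.1.1, p.1.2.1, p.1.2.2, p.2))

-- ===== PRECONDITION & SPEC =====
def Spec_count_trigrams (sentences : List (List String)) (out : List (String × String × String × Int)) : Prop := out = count_trigrams_alt sentences
instance (sentences : List (List String)) (out : List (String × String × String × Int)) : Decidable (Spec_count_trigrams sentences out) := by unfold Spec_count_trigrams; infer_instance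

-- ===== CLAIM (what is proved, stated in full; the proofs are below) =====
def Claim_equal_count_trigrams : Prop := ∀ (sentences : List (List String)), Dom_count_trigrams sentences → Spec_count_trigrams sentences (count_trigrams sentences)

-- ===== LEMMAS AND PROOFS =====

-- the middle trigram of s at offset k
def pvTrip (s : List String) (k : Nat) : String × String × String :=
  (s.getD k "", s.getD (k + 1) "", s.getD (k + 2) "")

-- the trigram fold over a BOUNDARY-terminated tail, in A's first/middle/last shape
lemma pvFold : ∀ (t : List String) (a b : String) (d : PySem.Dict (String × String × String) Int),
    (pvTrigs (a :: b :: t ++ [pvBOUNDARY])).foldl pvIncr d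
      = pvIncr (((List.range t.length).map (pvTrip (a :: b :: t))).foldl pvIncr d)
          ((a :: b :: t).getD t.length "", (a :: b :: t).getD (t.length + 1) "", pvBOUNDARY) := by
  intro t
  induction t with
  | nil => intro a b d; rfl
  | cons c t' ih =>
      intro a b d
      have h1 : pvTrigs (a :: b :: (c :: t') ++ [pvBOUNDARY])
          = (a, b, c) :: pvTrigs (b :: c :: t' ++ [pvBOUNDARY]) := rfl
      rw [h1, List.foldl_cons, ih b c (pvIncr d (a, b, c))]
      have h2 : (List.range (c :: t').length).map (pvTrip (a :: b :: c :: t'))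
          = (a, b, c) :: (List.range t'.length).map (pvTrip (b :: c :: t')) := by
        simp [List.range_succ_eq_map, pvTrip, Function.comp]
      rw [h2, List.foldl_cons]
      rfl

lemma pvStepA_cons₂ (a b : String) (t : List String)
    (d : PySem.Dict (String × String × String) Int) :
    pvStepA d (a :: b :: t)
      = pvIncr (((List.range t.length).map (pvTrip (a :: b :: t))).foldl pvIncr
            (pvIncr d (pvBOUNDARY, a, b)))
          ((a :: b :: t).getD t.length "", (a :: b :: t).getD (t.length + 1) "", pvBOUNDARY) := by
  have hn : PySem.List.len (a :: b :: t) = ((t.length + 2 : Nat) : Int) := by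
    simp [PySem.List.len_eq]
    try omega
  have hA : pvStepA d (a :: b :: t)
      = pvIncr ((PySem.List.pyRange 1 (((t.length + 2 : Nat) : Int) - 1) 1).foldl
          (fun x i => pvIncr x (PySem.List.pyGetD (a :: b :: t) (i - 1) "",
                                PySem.List.pyGetD (a :: b :: t) i "",
                                PySem.List.pyGetD (a :: b :: t) (i + 1) ""))
          (pvIncr d (pvBOUNDARY, PySem.List.pyGetD (a :: b :: t) 0 "",
                     PySem.List.pyGetD (a :: b :: t) 1 "")))
        (PySem.List.pyGetD (a :: b :: t) (((t.length + 2 : Nat) : Int) - 2) "",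
         PySem.List.pyGetD (a :: b :: t) (((t.length + 2 : Nat) : Int) - 1) "", pvBOUNDARY) := by
    unfold pvStepA
    rw [hn, if_neg (by push_cast; omega), if_neg (by push_cast; omega)]
  rw [hA]
  have hr : PySem.List.pyRange 1 (((t.length + 2 : Nat) : Int) - 1) 1
      = (List.range t.length).map (fun k : Nat => (1 : Int) + (k : Int)) := by
    rw [PySem.List.pyRange_one]
    have h : ((((t.length + 2 : Nat) : Int) - 1) - 1).toNat = t.length := by omega
    rw [h]
  have e4 : ((t.length + 2 : Nat) : Int) - 2 = ((t.length : Nat) : Int) := by push_cast; ring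
  have e5 : ((t.length + 2 : Nat) : Int) - 1 = ((t.length + 1 : Nat) : Int) := by push_cast; ring
  rw [hr, e4, e5, List.foldl_map]
  have hfun : (fun (x : PySem.Dict (String × String × String) Int) (y : Nat) =>
        pvIncr x (PySem.List.pyGetD (a :: b :: t) ((1 : Int) + (y : Int) - 1) "",
                  PySem.List.pyGetD (a :: b :: t) ((1 : Int) + (y : Int)) "",
                  PySem.List.pyGetD (a :: b :: t) ((1 : Int) + (y : Int) + 1) ""))
      = fun x y => pvIncr x (pvTrip (a :: b :: t) y) := by
    funext x y
    have e1 : (1 : Int) + (y : Int) - 1 = ((y : Nat) : Int) := by ring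
    have e3 : (1 : Int) + (y : Int) + 1 = ((y + 2 : Nat) : Int) := by push_cast; ring
    have e2 : (1 : Int) + (y : Int) = ((y + 1 : Nat) : Int) := by push_cast; ring
    rw [e1, e3, e2]
    simp only [PySem.List.pyGetD_natCast, pvTrip]
  rw [hfun, ← List.foldl_map (f := pvTrip (a :: b :: t)) (g := pvIncr)]
  simp only [PySem.List.pyGetD_natCast, PySem.List.pyGetD_ofNat']
  rfl

-- one sentence of A's loop = folding pvIncr over that sentence's padded trigrams
lemma pvStep_eq (s : List String) (d : PySem.Dict (String × String × String) Int) :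
    pvStepA d s = (pvTrigs (pvBOUNDARY :: s ++ [pvBOUNDARY])).foldl pvIncr d := by
  match s with
  | [] => rfl
  | [a] => rfl
  | a :: b :: t =>
      have h1 : pvTrigs (pvBOUNDARY :: (a :: b :: t) ++ [pvBOUNDARY])
          = (pvBOUNDARY, a, b) :: pvTrigs (a :: b :: t ++ [pvBOUNDARY]) := rfl
      rw [h1, List.foldl_cons, pvFold t a b (pvIncr d (pvBOUNDARY, a, b)),
        pvStepA_cons₂ a b t d]

-- staging: counting the concatenated flat list = A's sentence-by-sentence fold
lemma pvStaged : ∀ (sentences : List (List String)) (acc : List (String × String × String))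
    (d : PySem.Dict (String × String × String) Int),
    (sentences.foldl (fun acc s => acc ++ pvTrigs (pvBOUNDARY :: s ++ [pvBOUNDARY])) acc).foldl
        pvIncr d
      = sentences.foldl pvStepA (acc.foldl pvIncr d) := by
  intro sentences
  induction sentences with
  | nil => intro acc d; rfl
  | cons s rest ih =>
      intro acc d
      rw [List.foldl_cons, List.foldl_cons, ih, List.foldl_append, ← pvStep_eq]

-- ===== VERDICT (by name: the statement is the Claim_ definition above) =====
theorem count_trigrams_spec : Claim_equal_count_trigrams := by
  intro sentences _
  unfold Spec_count_trigrams count_trigrams count_trigrams_alt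
  simp only []
  rw [pvStaged sentences [] PySem.Dict.empty]
  rfl
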